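-- pv_equiv track=rewrite | github.com/w3c/ift-client-tests | generators/testCaseGeneratorLib/html.py | expandSpecLinks
-- ===== SOURCE A (Python) =====
-- specificationURL = "https://www.w3.org/TR/IFT/";
--
-- def expandSpecLinks(links):
--     """
--     This function expands anchor-only references to fully qualified spec links.
--     #name expands to <iftspecurl>#name.
--
--     links: 0..N space-separated #anchor references
--     """
--     if links is None or len(links) == 0:
--         links = ""
--
--     specLinks = []
--     for link in links.split(" "):
--         link = specificationURL + link
--
--         specLinks.append(link)
--
--     return " ".join(specLinks)
-- ===== SOURCE B (Python) =====
-- specificationURL = "https://www.w3.org/TR/IFT/";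
--
-- def expandSpecLinks(links):
--     """
--     Closed-form rewrite: prepend the spec URL to the first token by
--     concatenation, then replace every internal space by a space followed by
--     the URL, so every subsequent (possibly empty) token is prefixed too.
--     """
--     if links is None or len(links) == 0:
--         links = ""
--     return (specificationURL + links).replace(" ", " " + specificationURL)
-- ===== Notes on version B (the rewrite author's own statement) =====
-- stated objective: idiomatic
-- what changed: Replaces the split/loop/append/join tokenization with a single closed-form expression: concatenate the URL in front, then replace each space character by a space followed by the URL.
import Mathlib
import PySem

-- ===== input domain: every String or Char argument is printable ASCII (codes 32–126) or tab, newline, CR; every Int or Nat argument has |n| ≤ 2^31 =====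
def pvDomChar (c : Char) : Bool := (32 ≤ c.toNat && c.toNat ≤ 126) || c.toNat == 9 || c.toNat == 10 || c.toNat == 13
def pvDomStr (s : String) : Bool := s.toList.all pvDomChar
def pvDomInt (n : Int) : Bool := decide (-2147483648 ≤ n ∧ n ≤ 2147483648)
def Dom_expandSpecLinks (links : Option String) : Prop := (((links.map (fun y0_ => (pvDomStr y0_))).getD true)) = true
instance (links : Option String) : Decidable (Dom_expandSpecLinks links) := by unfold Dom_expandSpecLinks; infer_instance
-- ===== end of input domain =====

-- B replaces A's split/loop/join tokenization by one closed-form concat+replace expression (idiomatic, same cost).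

def pvSpecURL : String := "https://www.w3.org/TR/IFT/"

-- ===== PORT A =====
def expandSpecLinks (links : Option String) : String :=
  let l : String := match links with
    | none => ""
    | some s => if PySem.Str.len s = 0 then "" else s
  let parts : List String := (PySem.Str.split? l " ").getD []
  let specLinks : List String := parts.foldl (fun acc link => acc ++ [pvSpecURL ++ link]) []
  PySem.Str.join " " specLinks

-- ===== PORT B =====
def expandSpecLinks_alt (links : Option String) : String :=
  let l : String := match links with
    | none => ""
    | some s => if PySem.Str.len s = 0 then "" else s
  PySem.Str.replace (pvSpecURL ++ l) " " (" " ++ pvSpecURL)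

-- ===== PRECONDITION & SPEC =====
def Spec_expandSpecLinks (links : Option String) (out : String) : Prop := out = expandSpecLinks_alt links
instance (links : Option String) (out : String) : Decidable (Spec_expandSpecLinks links out) := by unfold Spec_expandSpecLinks; infer_instance

-- ===== CLAIM (what is proved, stated in full; the proofs are below) =====
def Claim_equal_expandSpecLinks : Prop := ∀ (links : Option String), Dom_expandSpecLinks links → Spec_expandSpecLinks links (expandSpecLinks links)

-- ===== LEMMAS AND PROOFS =====

-- head and tail of the split of cs on ' '
def pvSplitSp : List Char → List Char × List (List Char)
  | [] => ([], [])
  | c :: t =>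
    let r := pvSplitSp t
    if c = ' ' then ([], r.1 :: r.2) else (c :: r.1, r.2)

-- cs with every ' ' replaced by ' ' :: u
def pvRep (u : List Char) : List Char → List Char
  | [] => []
  | c :: t => if c = ' ' then (' ' :: u) ++ pvRep u t else c :: pvRep u t

theorem pvSplitOn_go (fuel : Nat) (l cur : List Char) (accs : List (List Char))
    (h : l.length ≤ fuel) :
    PySem.Chars.splitOn.go [' '] fuel l cur accs =
      accs.reverse ++ (cur.reverse ++ (pvSplitSp l).1) :: (pvSplitSp l).2 := by
  induction fuel generalizing l cur accs with
  | zero =>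
    have : l = [] := List.length_eq_zero_iff.mp (Nat.le_zero.mp h)
    subst this
    simp [PySem.Chars.splitOn.go, pvSplitSp]
  | succ f ih =>
    cases l with
    | nil => simp [PySem.Chars.splitOn.go, pvSplitSp]
    | cons c rest =>
      have hrest : rest.length ≤ f := by simpa using h
      by_cases hc : c = ' '
      · subst hc
        rw [show PySem.Chars.splitOn.go [' '] (f+1) (' ' :: rest) cur accs =
              PySem.Chars.splitOn.go [' '] f (List.drop 1 (' ' :: rest)) [] (cur.reverse :: accs) by
            simp [PySem.Chars.splitOn.go, List.isPrefixOf]]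
        rw [ih _ _ _ (by simpa using hrest)]
        simp [pvSplitSp]
      · rw [show PySem.Chars.splitOn.go [' '] (f+1) (c :: rest) cur accs =
              PySem.Chars.splitOn.go [' '] f rest (c :: cur) accs by
            simp [PySem.Chars.splitOn.go, List.isPrefixOf, Ne.symm hc]]
        rw [ih _ _ _ hrest]
        simp [pvSplitSp, hc]

theorem pvSplitOn_eq (cs : List Char) :
    PySem.Chars.splitOn cs [' '] = (pvSplitSp cs).1 :: (pvSplitSp cs).2 := by
  unfold PySem.Chars.splitOn
  rw [pvSplitOn_go _ _ _ _ (by omega)]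
  simp

theorem pvReplace_go (u : List Char) (fuel : Nat) (l acc : List Char)
    (h : l.length ≤ fuel) :
    PySem.Chars.replace.go [' '] (' ' :: u) fuel l acc = acc.reverse ++ pvRep u l := by
  induction fuel generalizing l acc with
  | zero =>
    have : l = [] := List.length_eq_zero_iff.mp (Nat.le_zero.mp h)
    subst this
    simp [PySem.Chars.replace.go, pvRep]
  | succ f ih =>
    cases l with
    | nil => simp [PySem.Chars.replace.go, pvRep]
    | cons c rest =>
      have hrest : rest.length ≤ f := by simpa using h
      by_cases hc : c = ' '
      · subst hc
        rw [show PySem.Chars.replace.go [' '] (' ' :: u) (f+1) (' ' :: rest) acc =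
              PySem.Chars.replace.go [' '] (' ' :: u) f (List.drop 1 (' ' :: rest))
                ((' ' :: u).reverse ++ acc) by
            simp [PySem.Chars.replace.go, List.isPrefixOf]]
        rw [ih _ _ (by simpa using hrest)]
        simp [pvRep]
      · rw [show PySem.Chars.replace.go [' '] (' ' :: u) (f+1) (c :: rest) acc =
              PySem.Chars.replace.go [' '] (' ' :: u) f rest (c :: acc) by
            simp [PySem.Chars.replace.go, List.isPrefixOf, Ne.symm hc]]
        rw [ih _ _ hrest]
        simp [pvRep, hc]

theorem pvRep_eq_split (u cs : List Char) :
    pvRep u cs =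
      (pvSplitSp cs).1 ++ ((pvSplitSp cs).2.map (fun s => ' ' :: (u ++ s))).flatten := by
  induction cs with
  | nil => simp [pvRep, pvSplitSp]
  | cons c t ih =>
    by_cases hc : c = ' '
    · subst hc; simp [pvRep, pvSplitSp, ih]
    · simp [pvRep, pvSplitSp, hc, ih]

theorem pvRep_append_nospace (u p cs : List Char) (hp : ∀ c ∈ p, ¬ c = ' ') :
    pvRep u (p ++ cs) = p ++ pvRep u cs := by
  induction p with
  | nil => simp
  | cons c t ih =>
    have hc : ¬ c = ' ' := hp c (by simp)
    simp [pvRep, hc, ih (fun c hc' => hp c (by simp [hc']))]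

theorem pvIntercalate_cons (sep x : List Char) (xs : List (List Char)) :
    sep.intercalate (x :: xs) = x ++ (xs.map (fun s => sep ++ s)).flatten := by
  induction xs generalizing x with
  | nil => simp [List.intercalate]
  | cons y ys ih =>
    rw [show List.intercalate sep (x :: y :: ys) = x ++ sep ++ List.intercalate sep (y :: ys) by
      simp [List.intercalate, List.intersperse]]
    rw [ih y]
    simp

theorem pvFoldl_append (parts : List String) (init : List String) :
    parts.foldl (fun acc link => acc ++ [pvSpecURL ++ link]) init =
      init ++ parts.map (fun link => pvSpecURL ++ link) := by
  induction parts generalizing init with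
  | nil => simp
  | cons p ps ih => simp [ih]

theorem pvMain (s : String) :
    PySem.Str.join " "
      (((PySem.Str.split? s " ").getD []).foldl (fun acc link => acc ++ [pvSpecURL ++ link]) []) =
      PySem.Str.replace (pvSpecURL ++ s) " " (" " ++ pvSpecURL) := by
  rw [pvFoldl_append]
  have hsplit : PySem.Str.split? s " " =
      some (((pvSplitSp s.toList).1 :: (pvSplitSp s.toList).2).map String.ofList) := by
    simp [PySem.Str.split?, PySem.Chars.split?, pvSplitOn_eq]
  rw [hsplit]
  have hu : ∀ c ∈ pvSpecURL.toList, ¬ c = ' ' := by simp [pvSpecURL]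
  apply String.ext
  simp only [PySem.Str.join, PySem.Str.replace, Option.getD_some, String.toList_ofList]
  have hB : (pvSpecURL ++ s).toList = pvSpecURL.toList ++ s.toList := by simp
  rw [show (" " ++ pvSpecURL).toList = ' ' :: pvSpecURL.toList by simp,
      show (" " : String).toList = [' '] by simp]
  unfold PySem.Chars.replace
  rw [if_neg (by simp), pvReplace_go _ _ _ _ (by simp [hB]), hB,
      pvRep_append_nospace _ _ _ hu, pvRep_eq_split]
  simp only [PySem.Chars.join]
  rw [show List.map String.toList
        ([] ++ List.map (fun link => pvSpecURL ++ link)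
          (List.map String.ofList ((pvSplitSp s.toList).1 :: (pvSplitSp s.toList).2))) =
        (pvSpecURL.toList ++ (pvSplitSp s.toList).1) ::
          (pvSplitSp s.toList).2.map (fun t => pvSpecURL.toList ++ t) by
      simp [Function.comp]]
  rw [pvIntercalate_cons]
  simp [Function.comp_def, List.append_assoc]

-- ===== VERDICT (by name: the statement is the Claim_ definition above) =====
theorem expandSpecLinks_spec : Claim_equal_expandSpecLinks := by
  intro links _
  unfold Spec_expandSpecLinks expandSpecLinks expandSpecLinks_alt
  cases links with
  | none => exact pvMain ""
  | some s =>
    by_cases h : PySem.Str.len s = 0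
    · simp only [h]; exact pvMain ""
    · simp only [if_neg h]; exact pvMain s
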